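-- pv_equiv track=rewrite | github.com/joeybose/Flexible-Fairness-Constraints | utils.py | reddit_mappings
-- ===== SOURCE A (Python) =====
-- def reddit_mappings(nodes):
--     users, subreddits = [], []
--     for ent in nodes:
--         if ent.split('_')[0] == 'U':
--             users.append(ent)
--         else:
--             subreddits.append(ent)
--
--     user_to_idx, sr_to_idx = {},{}
--     for i, ent in enumerate(users):
--         user_to_idx[ent] = i
--
--     for j, sr in enumerate(subreddits):
--         sr_to_idx[sr] = j
--     return user_to_idx, sr_to_idx
-- ===== SOURCE B (Python) =====
-- def reddit_mappings(nodes):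
--     user_to_idx, sr_to_idx = {}, {}
--     u_count = s_count = 0
--     for ent in nodes:
--         if ent.split('_')[0] == 'U':
--             user_to_idx[ent] = u_count
--             u_count += 1
--         else:
--             sr_to_idx[ent] = s_count
--             s_count += 1
--     return user_to_idx, sr_to_idx
-- ===== Notes on version B (the rewrite author's own statement) =====
-- stated objective: simpler
-- what changed: One pass over nodes with two inline counters filling the dicts directly, instead of building users/subreddits lists and then re-enumerating each into a dict.
import Mathlib
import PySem

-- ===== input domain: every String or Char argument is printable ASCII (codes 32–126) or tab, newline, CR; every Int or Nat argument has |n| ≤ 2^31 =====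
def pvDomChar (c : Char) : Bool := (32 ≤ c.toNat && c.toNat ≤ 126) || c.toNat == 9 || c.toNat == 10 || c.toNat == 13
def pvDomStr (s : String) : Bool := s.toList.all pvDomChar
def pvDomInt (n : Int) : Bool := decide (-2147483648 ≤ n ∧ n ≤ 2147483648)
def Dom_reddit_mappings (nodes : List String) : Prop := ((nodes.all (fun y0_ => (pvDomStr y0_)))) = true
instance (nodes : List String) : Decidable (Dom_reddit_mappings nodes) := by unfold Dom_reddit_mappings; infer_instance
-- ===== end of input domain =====

-- B replaces A's three loops (partition into lists, then re-enumerate each into a dict)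
-- by a single pass with two inline counters; same values, simpler decomposition.


-- ===== PORT A =====
-- ent.split('_')[0] == 'U'   (split('_') is never empty, so [0] is its head)
def pvIsUser (ent : String) : Bool :=
  PySem.List.pyGet? ((PySem.Str.split? ent "_").getD []) 0 == some "U"

def reddit_mappings (nodes : List String) : (List (String × Int)) × (List (String × Int)) :=
  let p := nodes.foldl (fun (p : List String × List String) ent =>
      if pvIsUser ent then (p.1 ++ [ent], p.2) else (p.1, p.2 ++ [ent])) ([], [])
  let user_to_idx := (PySem.List.enumerate p.1 0).foldl
      (fun (d : PySem.Dict String Int) ie => d.insert ie.2 ie.1) PySem.Dict.empty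
  let sr_to_idx := (PySem.List.enumerate p.2 0).foldl
      (fun (d : PySem.Dict String Int) ie => d.insert ie.2 ie.1) PySem.Dict.empty
  (user_to_idx.items, sr_to_idx.items)

-- ===== PORT B =====
def reddit_mappings_alt (nodes : List String) : (List (String × Int)) × (List (String × Int)) :=
  let st := nodes.foldl
      (fun (st : PySem.Dict String Int × PySem.Dict String Int × Int × Int) ent =>
        if pvIsUser ent then (st.1.insert ent st.2.2.1, st.2.1, st.2.2.1 + 1, st.2.2.2)
        else (st.1, st.2.1.insert ent st.2.2.2, st.2.2.1, st.2.2.2 + 1))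
      (PySem.Dict.empty, PySem.Dict.empty, 0, 0)
  (st.1.items, st.2.1.items)

-- ===== PRECONDITION & SPEC =====
def Spec_reddit_mappings (nodes : List String) (out : (List (String × Int)) × (List (String × Int))) : Prop := out = reddit_mappings_alt nodes
instance (nodes : List String) (out : (List (String × Int)) × (List (String × Int))) : Decidable (Spec_reddit_mappings nodes out) := by unfold Spec_reddit_mappings; infer_instance

-- ===== CLAIM (what is proved, stated in full; the proofs are below) =====
def Claim_equal_reddit_mappings : Prop := ∀ (nodes : List String), Dom_reddit_mappings nodes → Spec_reddit_mappings nodes (reddit_mappings nodes)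

-- ===== LEMMAS AND PROOFS =====

-- dict built from enumerate us 0, as in A's second/third loops
def pvDictOf (us : List String) : PySem.Dict String Int :=
  (PySem.List.enumerate us 0).foldl
      (fun (d : PySem.Dict String Int) ie => d.insert ie.2 ie.1) PySem.Dict.empty

theorem pvDictOf_snoc (us : List String) (e : String) :
    pvDictOf (us ++ [e]) = (pvDictOf us).insert e (us.length : Int) := by
  unfold pvDictOf
  rw [PySem.List.enumerate_append]
  simp [PySem.List.enumerate]

theorem pv_main (nodes us ss : List String) :
    nodes.foldl
      (fun (st : PySem.Dict String Int × PySem.Dict String Int × Int × Int) ent =>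
        if pvIsUser ent then (st.1.insert ent st.2.2.1, st.2.1, st.2.2.1 + 1, st.2.2.2)
        else (st.1, st.2.1.insert ent st.2.2.2, st.2.2.1, st.2.2.2 + 1))
      (pvDictOf us, pvDictOf ss, (us.length : Int), (ss.length : Int))
    = (let p := nodes.foldl (fun (p : List String × List String) ent =>
          if pvIsUser ent then (p.1 ++ [ent], p.2) else (p.1, p.2 ++ [ent])) (us, ss)
       (pvDictOf p.1, pvDictOf p.2, (p.1.length : Int), (p.2.length : Int))) := by
  induction nodes generalizing us ss with
  | nil => simp
  | cons ent rest ih =>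
      simp only [List.foldl_cons]
      by_cases h : pvIsUser ent = true
      · rw [if_pos h, if_pos h]
        have := ih (us ++ [ent]) ss
        rw [pvDictOf_snoc] at this
        simpa using this
      · rw [if_neg h, if_neg h]
        have := ih us (ss ++ [ent])
        rw [pvDictOf_snoc] at this
        simpa using this

-- ===== VERDICT (by name: the statement is the Claim_ definition above) =====
theorem reddit_mappings_spec : Claim_equal_reddit_mappings := by
  intro nodes _
  show reddit_mappings nodes = reddit_mappings_alt nodes
  unfold reddit_mappings reddit_mappings_alt
  have h := pv_main nodes [] []
  simp only [List.length_nil, Nat.cast_zero] at h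
  have h0 : pvDictOf [] = PySem.Dict.empty := rfl
  rw [h0] at h
  rw [h]
  rfl
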